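-- pv_equiv track=rewrite | github.com/dj-lumiere/problem-solving-boj | 백준/Platinum/1979. 극적인 곱셈/극적인 곱셈.py | power_finder
-- ===== SOURCE A (Python) =====
-- def power_finder(n: int) -> int:
--     modulo = 10 * n - 1
--     counter = 0
--     while True:
--         if pow(10, counter, modulo) == n:
--             return counter
--         else:
--             counter += 1
-- ===== SOURCE B (Python) =====
-- def power_finder(n: int) -> int:
--     # Walk the inverse orbit with a digit/carry step (parasitic-number automaton):
--     # since 10*n == 1 (mod 10n-1), n is 10^(-1), and the state update
--     # c -> n*(c % 10) + c // 10 divides the residue by 10 mod (10n-1) using only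
--     # one small multiplication - no pow and no reduction mod (10n-1) in the loop.
--     modulo = 10 * n - 1
--     target = 1 % modulo
--     state = n % modulo
--     length = 0
--     while state != target:
--         state = n * (state % 10) + state // 10
--         length += 1
--     return length
-- ===== Notes on version B (the rewrite author's own statement) =====
-- stated objective: faster
-- what changed: Replaces A's linear search that recomputes pow(10, counter, modulo) each step by a parasitic-number digit/carry automaton: the state c -> n*(c % 10) + c // 10 multiplies the residue by 10^(-1) = n mod (10n-1) using one digit extraction and one small multiplication, never reducing mod (10n-1) inside the loop, and stops when the state reaches 1 % modulo.
import Mathlib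
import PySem

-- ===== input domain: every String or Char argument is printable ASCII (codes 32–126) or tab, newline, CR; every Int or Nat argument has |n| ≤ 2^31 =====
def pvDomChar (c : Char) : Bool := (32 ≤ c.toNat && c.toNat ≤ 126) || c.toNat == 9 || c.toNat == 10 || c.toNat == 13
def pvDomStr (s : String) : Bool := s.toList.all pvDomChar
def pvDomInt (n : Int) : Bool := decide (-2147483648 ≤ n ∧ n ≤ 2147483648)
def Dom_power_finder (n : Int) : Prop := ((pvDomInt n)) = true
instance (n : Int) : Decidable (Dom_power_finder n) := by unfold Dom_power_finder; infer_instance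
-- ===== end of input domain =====

-- B replaces A's per-step modular exponentiation by a parasitic-number digit/carry
-- automaton (state ← n*(state % 10) + state // 10, stop at 1 % modulo): faster, one
-- small multiplication per step and no modular reduction in the loop.

-- ===== PORT A =====
-- A's 'while True' loop, searching upward for the first counter with
-- pow(10, counter, modulo) == n; ported with a fuel bound (2^64) that only makes
-- the recursion total — it is never reached by the proof or the claim.
def pvLoopA (n m : Int) : Nat → Nat → Int
  | 0, _ => 0
  | fuel + 1, counter =>
      if PySem.Int.powMod 10 counter m = n then (counter : Int)
      else pvLoopA n m fuel (counter + 1)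

def power_finder (n : Int) : Int := pvLoopA n (10 * n - 1) 18446744073709551616 0

-- ===== PORT B =====
-- B's loop: state starts at n % modulo and steps by state ← n*(state % 10) + state // 10
-- until it reaches target = 1 % modulo; the loop body never touches modulo.
def pvLoopB (n target : Int) : Nat → Int → Nat → Int
  | 0, _, _ => 0
  | fuel + 1, state, length =>
      if state = target then (length : Int)
      else pvLoopB n target fuel
        (n * PySem.Int.mod state 10 + PySem.Int.floordiv state 10) (length + 1)

def power_finder_alt (n : Int) : Int :=
  pvLoopB n (PySem.Int.mod 1 (10 * n - 1)) 18446744073709551616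
    (PySem.Int.mod n (10 * n - 1)) 0

-- ===== PRECONDITION & SPEC =====
def Spec_power_finder (n : Int) (out : Int) : Prop := out = power_finder_alt n
instance (n : Int) (out : Int) : Decidable (Spec_power_finder n out) := by unfold Spec_power_finder; infer_instance

-- ===== CLAIM (what is proved, stated in full; the proofs are below) =====
def Claim_equal_power_finder : Prop := ∀ (n : Int), Dom_power_finder n → Spec_power_finder n (power_finder n)

-- ===== LEMMAS AND PROOFS =====

-- B's state stays in the canonical residue range of m = 10n-1 (Python-% range:
-- [0, m) for m > 0, i.e. n ≥ 1; (m, 0] for m < 0, i.e. n ≤ 0).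
def pvInRange (n c : Int) : Prop :=
  (1 ≤ n → 0 ≤ c ∧ c < 10 * n - 1) ∧ (n ≤ 0 → 10 * n - 1 < c ∧ c ≤ 0)

-- congruent mod m → same Python-% value
theorem pvModCongr (m a b : Int) (h : m ∣ a - b) :
    PySem.Int.mod a m = PySem.Int.mod b m := by
  obtain ⟨k, hk⟩ := h
  have : a = b + m * k := by linarith
  simp [PySem.Int.mod, this, Int.add_mul_fmod_self_left]

-- a is congruent to a % m
theorem pvDvdSubMod (m a : Int) : m ∣ a - PySem.Int.mod a m := by
  simp only [PySem.Int.mod, Int.fmod_def]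
  exact ⟨a.fdiv m, by ring⟩

-- a canonical-range value is its own Python-% value
theorem pvModSelf (n c : Int) (h : pvInRange n c) :
    PySem.Int.mod c (10 * n - 1) = c := by
  obtain ⟨h1, h2⟩ := h
  have hd : (10 * n - 1) ∣ PySem.Int.mod c (10 * n - 1) - c := by
    have h := pvDvdSubMod (10 * n - 1) c
    have he : PySem.Int.mod c (10 * n - 1) - c = -(c - PySem.Int.mod c (10 * n - 1)) := by ring
    rw [he]; exact dvd_neg.mpr h
  rcases lt_or_ge n 1 with hn | hn
  · have hm : 10 * n - 1 < 0 := by omega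
    have hb := PySem.Int.mod_neg_bounds c hm
    have hc := h2 (by omega)
    have : PySem.Int.mod c (10 * n - 1) - c = 0 := by
      refine Int.eq_zero_of_abs_lt_dvd ((abs_dvd _ _).mpr hd) ?_
      rw [abs_of_neg hm, abs_lt]
      omega
    omega
  · have hm : 0 < 10 * n - 1 := by omega
    have hb1 := PySem.Int.mod_nonneg c hm
    have hb2 := PySem.Int.mod_lt c hm
    have hc := h1 hn
    have : PySem.Int.mod c (10 * n - 1) - c = 0 := by
      refine Int.eq_zero_of_abs_lt_dvd ((abs_dvd _ _).mpr hd) ?_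
      rw [abs_of_pos hm, abs_lt]
      omega
    omega

theorem pvInRange_n (n : Int) : pvInRange n n := by
  constructor <;> intro h <;> omega

-- one B step multiplies by 10⁻¹: 10·step(c) ≡ c  (mod 10n-1)
theorem pvStepCongr (n c : Int) :
    10 * (n * PySem.Int.mod c 10 + PySem.Int.floordiv c 10) - c
      = (10 * n - 1) * PySem.Int.mod c 10 := by
  have h := PySem.Int.floordiv_mul_add_mod c 10
  linarith [h, mul_comm n (PySem.Int.mod c 10)]

-- one B step stays in range
theorem pvStepRange (n c : Int) (h : pvInRange n c) :
    pvInRange n (n * PySem.Int.mod c 10 + PySem.Int.floordiv c 10) := by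
  obtain ⟨h1, h2⟩ := h
  have hr1 : 0 ≤ PySem.Int.mod c 10 := PySem.Int.mod_nonneg c (by norm_num)
  have hr2 : PySem.Int.mod c 10 < 10 := PySem.Int.mod_lt c (by norm_num)
  have hq := PySem.Int.floordiv_mul_add_mod c 10
  set r := PySem.Int.mod c 10 with hrdef
  set q := PySem.Int.floordiv c 10 with hqdef
  constructor <;> intro hn
  · have hc := h1 hn
    interval_cases r <;> constructor <;> nlinarith
  · have hc := h2 hn
    interval_cases r <;> constructor <;> nlinarith

-- the two loop tests agree under the invariant 10^j · c ≡ n (mod 10n-1)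
theorem pvTestIff (n c : Int) (j : Nat)
    (hdvd : (10 * n - 1) ∣ 10 ^ j * c - n) (hr : pvInRange n c) :
    (PySem.Int.powMod 10 j (10 * n - 1) = n) ↔ (c = PySem.Int.mod 1 (10 * n - 1)) := by
  set m := 10 * n - 1 with hm
  constructor
  · intro h
    -- m ∣ 10^j - n, hence m ∣ n·(c-1), hence m ∣ (10n)·(c-1) = (m+1)(c-1), hence m ∣ c-1
    have h1 : m ∣ (10 : Int) ^ j - n := by
      have h' : PySem.Int.mod ((10 : Int) ^ j) m = n := h
      have := pvDvdSubMod m ((10 : Int) ^ j)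
      rwa [h'] at this
    have h2 : m ∣ n * (c - 1) := by
      have hc : m ∣ ((10 : Int) ^ j - n) * c := h1.mul_right c
      have : n * (c - 1) = (10 ^ j * c - n) - ((10 : Int) ^ j - n) * c := by ring
      rw [this]; exact dvd_sub hdvd hc
    have h3 : m ∣ c - 1 := by
      have h10 : m ∣ 10 * (n * (c - 1)) := h2.mul_left 10
      have he : 10 * (n * (c - 1)) = m * (c - 1) + (c - 1) := by rw [hm]; ring
      rw [he] at h10
      exact (dvd_add_right (dvd_mul_right m (c - 1))).mp h10
    have := pvModCongr m c 1 h3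
    rw [pvModSelf n c hr] at this
    exact this
  · intro h
    have h1 : m ∣ c - 1 := by
      have hs := pvDvdSubMod m 1
      rw [← h] at hs
      have he : c - 1 = -(1 - c) := by ring
      rw [he]; exact dvd_neg.mpr hs
    have h2 : m ∣ (10 : Int) ^ j - n := by
      have hc : m ∣ 10 ^ j * (c - 1) := h1.mul_left _
      have : (10 : Int) ^ j - n = (10 ^ j * c - n) - 10 ^ j * (c - 1) := by ring
      rw [this]; exact dvd_sub hdvd hc
    have := pvModCongr m ((10 : Int) ^ j) n h2
    rw [pvModSelf n n (pvInRange_n n)] at this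
    simpa [PySem.Int.powMod] using this

-- equal fuel, aligned branches: the loops return the same counter
theorem pvLoop_eq (n : Int) : ∀ (fuel j : Nat) (c : Int),
    (10 * n - 1) ∣ 10 ^ j * c - n → pvInRange n c →
    pvLoopA n (10 * n - 1) fuel j
      = pvLoopB n (PySem.Int.mod 1 (10 * n - 1)) fuel c j := by
  intro fuel
  induction fuel with
  | zero => intro j c _ _; rfl
  | succ fuel ih =>
      intro j c hdvd hr
      simp only [pvLoopA, pvLoopB]
      rw [if_congr (pvTestIff n c j hdvd hr) rfl rfl]
      split
      · rfl
      · refine ih (j + 1) _ ?_ (pvStepRange n c hr)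
        have hstep := pvStepCongr n c
        have : 10 ^ (j + 1) * (n * PySem.Int.mod c 10 + PySem.Int.floordiv c 10) - n
            = (10 ^ j * c - n) + 10 ^ j * ((10 * n - 1) * PySem.Int.mod c 10) := by
          rw [← hstep]; ring
        rw [this]
        exact dvd_add hdvd (Dvd.dvd.mul_left ⟨PySem.Int.mod c 10, rfl⟩ _)

-- ===== VERDICT (by name: the statement is the Claim_ definition above) =====
theorem power_finder_spec : Claim_equal_power_finder := by
  intro n _
  unfold Spec_power_finder power_finder power_finder_alt
  rw [pvModSelf n n (pvInRange_n n)]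
  exact pvLoop_eq n _ 0 n (by simp) (pvInRange_n n)
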